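-- pv_equiv track=rewrite | github.com/pc5401/my_BOJ | 백준/Silver/7795. 먹을 것인가 먹힐 것인가/먹을 것인가 먹힐 것인가.py | func
-- ===== SOURCE A (Python) =====
-- def func(n:int, lst:list, l):
--     start, end = 0, l-1
--     v = -1
--     while start <= end:
--         mid = (start + end) // 2
--
--         if n > lst[mid]: # 왼쪽 이동
--             start = mid + 1
--             v = mid
--         else:
--             end = mid - 1
--
--     return v
-- ===== SOURCE B (Python) =====
-- def func(n: int, lst: list, l):
--     cnt = 0
--     for i in range(l):
--         if lst[i] < n:
--             cnt += 1
--     return cnt - 1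
-- ===== Notes on version B (the rewrite author's own statement) =====
-- stated objective: simpler
-- what changed: Replaces the binary search over [0,l-1] with a single linear pass that counts elements strictly less than n among the first l elements and returns that count minus 1.
-- outside the precondition, e.g. on func(3, [5, 1, 2], 3): A returns 2, B returns 1; on func(0, [5], 2): A returns -1, B raises IndexError
import Mathlib
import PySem

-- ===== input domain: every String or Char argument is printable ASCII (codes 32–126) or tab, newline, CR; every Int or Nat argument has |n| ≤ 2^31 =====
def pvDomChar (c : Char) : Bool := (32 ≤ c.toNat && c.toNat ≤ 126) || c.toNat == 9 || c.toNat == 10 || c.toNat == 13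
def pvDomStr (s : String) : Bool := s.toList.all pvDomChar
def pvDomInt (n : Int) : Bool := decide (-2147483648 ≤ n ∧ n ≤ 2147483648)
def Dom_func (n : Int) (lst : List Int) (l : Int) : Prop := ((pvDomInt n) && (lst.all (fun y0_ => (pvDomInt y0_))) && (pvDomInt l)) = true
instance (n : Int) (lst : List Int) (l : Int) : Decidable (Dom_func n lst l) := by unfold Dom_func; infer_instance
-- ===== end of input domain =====

-- B replaces A's binary search with a single linear counting pass (simpler); equivalent on sorted input.

-- ===== PORT A =====
-- the while loop of A, step for step; the fuel argument only makes the loop total (it strictly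
-- exceeds the interval length at the call site, so the fuel-exhausted branch is unreachable);
-- pyGetD's default is unreached under Pre_func (mid is always in range there)
def funcLoop (n : Int) (lst : List Int) : Nat → Int → Int → Int → Int
  | 0, _start, _end_, v => v
  | fuel + 1, start, end_, v =>
    if start ≤ end_ then
      let mid := PySem.Int.floordiv (start + end_) 2
      if n > PySem.List.pyGetD lst mid 0 then
        funcLoop n lst fuel (mid + 1) end_ mid
      else
        funcLoop n lst fuel start (mid - 1) v
    else v

def func (n : Int) (lst : List Int) (l : Int) : Int :=
  funcLoop n lst (l.toNat + 1) 0 (l - 1) (-1)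

-- ===== PORT B =====
def func_alt (n : Int) (lst : List Int) (l : Int) : Int :=
  ((PySem.List.pyRange 0 l 1).foldl
    (fun cnt i => if PySem.List.pyGetD lst i 0 < n then cnt + 1 else cnt) 0) - 1

-- ===== PRECONDITION & SPEC =====
-- Pre_ excludes l > len(lst) (both programs can raise IndexError there; where A happens to return,
-- B raises) and lists whose first-l prefix is not sorted nondecreasingly, on which A's binary-search
-- answer is an accident of the probe sequence (binary search is only specified on sorted input).
def Pre_func (n : Int) (lst : List Int) (l : Int) : Prop :=
  l ≤ (lst.length : Int) ∧ List.Pairwise (· ≤ ·) (lst.take l.toNat)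
instance (n : Int) (lst : List Int) (l : Int) : Decidable (Pre_func n lst l) := by
  unfold Pre_func; infer_instance
def pvWitness_func : Int × List Int × Int := (2, [1, 3], 2)

def Spec_func (n : Int) (lst : List Int) (l : Int) (out : Int) : Prop := out = func_alt n lst l
instance (n : Int) (lst : List Int) (l : Int) (out : Int) : Decidable (Spec_func n lst l out) := by
  unfold Spec_func; infer_instance

-- ===== CLAIM (what is proved, stated in full; the proofs are below) =====
def Claim_equal_func : Prop := ∀ (n : Int) (lst : List Int) (l : Int), Dom_func n lst l → Pre_func n lst l → Spec_func n lst l (func n lst l)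

-- ===== LEMMAS AND PROOFS =====

-- a fold that adds 1 on a predicate is countP plus the accumulator
lemma foldl_count (p : Int → Int → Prop) [∀ n i, Decidable (p n i)] (n : Int) :
    ∀ (xs : List Int) (acc : Int),
      xs.foldl (fun cnt i => if p n i then cnt + 1 else cnt) acc
        = acc + (xs.countP (fun i => decide (p n i)) : Int) := by
  intro xs
  induction xs with
  | nil => simp
  | cons x xs ih =>
      intro acc
      simp only [List.foldl_cons, List.countP_cons, ih]
      by_cases hx : p n x <;> simp [hx] <;> ring

lemma func_alt_eq_countP (n : Int) (lst : List Int) (l : Int) :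
    func_alt n lst l
      = ((PySem.List.pyRange 0 l 1).countP
          (fun i => decide (PySem.List.pyGetD lst i 0 < n)) : Int) - 1 := by
  unfold func_alt
  rw [foldl_count (fun n i => PySem.List.pyGetD lst i 0 < n) n]
  ring

-- the binary-search invariant: indices below start satisfy the predicate, indices above end_ (below l) do not
lemma loop_inv (n : Int) (lst : List Int) (l : Int) :
    ∀ (fuel : Nat) (start end_ : Int), (end_ + 1 - start).toNat < fuel →
      0 ≤ start → end_ ≤ l - 1 → start ≤ end_ + 1 →
      (∀ i j : Int, 0 ≤ i → i ≤ j → j < l →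
          PySem.List.pyGetD lst i 0 ≤ PySem.List.pyGetD lst j 0) →
      (∀ i : Int, 0 ≤ i → i < start → PySem.List.pyGetD lst i 0 < n) →
      (∀ i : Int, end_ < i → i < l → ¬ PySem.List.pyGetD lst i 0 < n) →
      funcLoop n lst fuel start end_ (start - 1)
        = ((PySem.List.pyRange 0 l 1).countP
            (fun i => decide (PySem.List.pyGetD lst i 0 < n)) : Int) - 1 := by
  intro fuel
  induction fuel with
  | zero => intro start end_ hk; omega
  | succ fuel IH =>
    intro start end_ hk h0 hend hse hs hlow hhigh
    rw [funcLoop]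
    by_cases h : start ≤ end_
    · have hmid := PySem.Int.floordiv_two_mid_bounds h
      set mid := PySem.Int.floordiv (start + end_) 2 with hm
      simp only [if_pos h]
      by_cases hcmp : n > PySem.List.pyGetD lst mid 0
      · rw [if_pos hcmp]
        have : funcLoop n lst fuel (mid + 1) end_ ((mid + 1) - 1)
            = ((PySem.List.pyRange 0 l 1).countP
                (fun i => decide (PySem.List.pyGetD lst i 0 < n)) : Int) - 1 := by
          refine IH (mid + 1) end_ (by omega) (by omega) hend (by omega) hs ?_ hhigh
          intro i hi0 hi
          by_cases hlt : i < start
          · exact hlow i hi0 hlt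
          · exact lt_of_le_of_lt (hs i mid hi0 (by omega) (by omega)) hcmp
        simpa using this
      · rw [if_neg hcmp]
        refine IH start (mid - 1) (by omega) h0 (by omega) (by omega) hs hlow ?_
        intro i hi hil
        by_cases hgt : end_ < i
        · exact hhigh i hgt hil
        · intro habs
          exact hcmp (lt_of_le_of_lt (hs mid i (by omega) (by omega) (by omega)) habs)
    · simp only [if_neg h]
      -- start > end_: the counted indices are exactly [0, start)
      have hsplit : PySem.List.pyRange 0 l 1
          = PySem.List.pyRange 0 start 1 ++ PySem.List.pyRange start l 1 :=
        PySem.List.pyRange_one_append 0 start l (by omega) (by omega)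
      rw [hsplit, List.countP_append]
      have h1 : (PySem.List.pyRange 0 start 1).countP
          (fun i => decide (PySem.List.pyGetD lst i 0 < n))
          = (PySem.List.pyRange 0 start 1).length := by
        rw [List.countP_eq_length]
        intro i hi
        have := (PySem.List.mem_pyRange_one).1 hi
        exact decide_eq_true (hlow i this.1 this.2)
      have h2 : (PySem.List.pyRange start l 1).countP
          (fun i => decide (PySem.List.pyGetD lst i 0 < n)) = 0 := by
        rw [List.countP_eq_zero]
        intro i hi
        have := (PySem.List.mem_pyRange_one).1 hi
        simpa using hhigh i (by omega) this.2
      rw [h1, h2, PySem.List.length_pyRange_one]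
      omega

-- sortedness of the prefix gives the index-monotonicity loop_inv needs
lemma sorted_index (lst : List Int) (l : Int) (hl : l ≤ (lst.length : Int))
    (hs : List.Pairwise (· ≤ ·) (lst.take l.toNat)) :
    ∀ i j : Int, 0 ≤ i → i ≤ j → j < l →
      PySem.List.pyGetD lst i 0 ≤ PySem.List.pyGetD lst j 0 := by
  intro i j hi0 hij hjl
  have hjlen : j < (lst.length : Int) := lt_of_lt_of_le hjl hl
  rw [PySem.List.pyGetD_eq_getElem lst 0 hi0 (by omega),
      PySem.List.pyGetD_eq_getElem lst 0 (by omega) hjlen]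
  rcases eq_or_lt_of_le hij with rfl | hlt
  · exact le_refl _
  · have hp := List.pairwise_iff_getElem.1 hs
    have hi' : i.toNat < (lst.take l.toNat).length := by
      simp [List.length_take]; omega
    have hj' : j.toNat < (lst.take l.toNat).length := by
      simp [List.length_take]; omega
    have := hp i.toNat j.toNat hi' hj' (by omega)
    simpa using this

-- ===== VERDICT (by name: the statement is the Claim_ definition above) =====
theorem func_spec : Claim_equal_func := by
  intro n lst l _ hpre
  obtain ⟨hl, hsorted⟩ := hpre
  unfold Spec_func func
  rw [func_alt_eq_countP]
  by_cases hl0 : 0 ≤ l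
  · have h := loop_inv n lst l (l.toNat + 1) 0 (l - 1) (by omega)
      le_rfl le_rfl (by omega)
      (sorted_index lst l hl hsorted)
      (by intro i h1 h2; omega)
      (by intro i h1 h2; omega)
    simpa using h
  · rw [funcLoop]
    have h1 : ¬ ((0:Int) ≤ l - 1) := by omega
    rw [if_neg h1, PySem.List.pyRange_one_eq_nil (by omega)]
    simp
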